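-- pv_equiv track=rewrite | github.com/PrithwishJana/CoTran | transpilers/TSS_CodeConv_PyTranslations/40/GFG.py | OddDivCount
-- ===== SOURCE A (Python) =====
-- import math
--
-- def OddDivCount(a, b):
--     res = 0
--     for i in range(a, b + 1):
--         divCount = 0
--         for j in range(1, i + 1):
--             if math.fmod(i, j) == 0:
--                 divCount += 1
--         if (math.fmod(divCount, 2)) != 0:
--             res += 1
--     return res
-- ===== SOURCE B (Python) =====
-- import math
--
-- def OddDivCount(a, b):
--     # An integer >= 1 has an odd number of divisors iff it is a perfect square;
--     # integers <= 0 contribute nothing. Count perfect squares in [max(a,1), b].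
--     lo = max(a, 1)
--     if b < lo:
--         return 0
--     return math.isqrt(b) - math.isqrt(lo - 1)
-- ===== Notes on version B (the rewrite author's own statement) =====
-- stated objective: alternative
-- what changed: Replaces A's nested trial-division loops over every i in [a,b] by a closed form: an integer >= 1 has an odd divisor count iff it is a perfect square, so the answer is isqrt(b) - isqrt(max(a,1)-1), computed with two integer square roots.
import Mathlib
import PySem

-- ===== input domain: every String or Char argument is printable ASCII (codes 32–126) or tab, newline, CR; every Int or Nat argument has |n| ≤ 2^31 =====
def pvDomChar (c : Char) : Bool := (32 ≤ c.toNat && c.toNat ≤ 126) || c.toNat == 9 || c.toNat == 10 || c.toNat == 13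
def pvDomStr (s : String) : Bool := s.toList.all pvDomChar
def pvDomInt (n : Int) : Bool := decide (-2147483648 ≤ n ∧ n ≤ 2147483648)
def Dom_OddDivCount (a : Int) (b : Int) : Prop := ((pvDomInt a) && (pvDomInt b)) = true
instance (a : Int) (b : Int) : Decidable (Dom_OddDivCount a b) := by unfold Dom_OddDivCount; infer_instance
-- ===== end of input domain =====

-- B counts the perfect squares in [max(a,1), b] with two integer square roots (an
-- integer ≥ 1 has an odd divisor count iff it is a perfect square): a closed form
-- in place of A's nested trial-division loops.

-- ===== PORT A =====
-- math.fmod(x, j) == 0 with j ≥ 1 holds exactly when j divides x (and on Dom,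
-- |ints| ≤ 2^31 < 2^53, the float computation is exact), i.e. Int emod = 0.
def OddDivCount (a : Int) (b : Int) : Int :=
  (PySem.List.pyRange a (b + 1) 1).foldl
    (fun res i =>
      -- divCount = the inner loop's result
      if ((PySem.List.pyRange 1 (i + 1) 1).foldl
            (fun divCount j => if i % j == 0 then divCount + 1 else divCount) (0 : Int)) % 2 != 0
      then res + 1 else res)
    0

-- ===== PORT B =====
-- math.isqrt n = Nat.sqrt (every call here has a nonnegative argument)
def OddDivCount_alt (a : Int) (b : Int) : Int :=
  let lo := max a 1
  if b < lo then 0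
  else (Nat.sqrt b.toNat : Int) - (Nat.sqrt (lo - 1).toNat : Int)

-- ===== PRECONDITION & SPEC =====
def Spec_OddDivCount (a : Int) (b : Int) (out : Int) : Prop := out = OddDivCount_alt a b
instance (a : Int) (b : Int) (out : Int) : Decidable (Spec_OddDivCount a b out) := by unfold Spec_OddDivCount; infer_instance

-- ===== CLAIM (what is proved, stated in full; the proofs are below) =====
def Claim_equal_OddDivCount : Prop := ∀ (a : Int) (b : Int), Dom_OddDivCount a b → Spec_OddDivCount a b (OddDivCount a b)

-- ===== LEMMAS AND PROOFS =====

-- the loop test of A's outer loop, as a predicate on i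
def pvP (i : Int) : Bool :=
  ((PySem.List.pyRange 1 (i + 1) 1).foldl
      (fun divCount j => if i % j == 0 then divCount + 1 else divCount) (0 : Int)) % 2 != 0

-- counting folds are countP
lemma foldl_count (p : Int → Bool) :
    ∀ (l : List Int) (c : Int),
      l.foldl (fun r i => if p i then r + 1 else r) c = c + l.countP p := by
  intro l
  induction l with
  | nil => intro c; simp
  | cons x xs ih =>
      intro c
      by_cases h : p x = true <;>
        simp only [List.foldl_cons, List.countP_cons, h, if_true, if_false,
          decide_eq_true_eq, ih] <;> push_cast <;> ring_nf <;> omega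
-- the inner counting fold, with its concrete predicate
lemma foldl_count_inner (i : Int) :
    ∀ (l : List Int) (c : Int),
      l.foldl (fun divCount j => if i % j == 0 then divCount + 1 else divCount) c =
        c + l.countP (fun j => i % j == 0) := by
  intro l
  induction l with
  | nil => intro c; simp
  | cons x xs ih =>
      intro c
      by_cases h : (i % x == 0) = true <;>
        simp only [List.foldl_cons, List.countP_cons, h, if_true, ih] <;>
          push_cast <;> ring_nf

lemma A_eq_countP (a b : Int) :
    OddDivCount a b = ((PySem.List.pyRange a (b + 1) 1).countP pvP : Int) := by
  have h : OddDivCount a b =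
      (PySem.List.pyRange a (b + 1) 1).foldl
        (fun res i => if pvP i then res + 1 else res) 0 := by
    unfold OddDivCount pvP
    rfl
  have h2 := foldl_count pvP (PySem.List.pyRange a (b + 1) 1) 0
  rw [h, h2, zero_add]

-- parity of a finset's cardinality under an involution
lemma card_parity_involution {α : Type} [DecidableEq α] (f : α → α) :
    ∀ (S : Finset α), (∀ x ∈ S, f x ∈ S) → (∀ x ∈ S, f (f x) = x) →
      S.card % 2 = (S.filter (fun x => f x = x)).card % 2 := by
  intro S
  induction S using Finset.strongInduction with
  | _ S ih =>
    intro hmem hinv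
    rcases S.eq_empty_or_nonempty with rfl | ⟨x, hx⟩
    · simp
    by_cases hfx : f x = x
    · -- remove the fixed point x
      have hTs : S.erase x ⊂ S := Finset.erase_ssubset hx
      have hmemT : ∀ y ∈ S.erase x, f y ∈ S.erase x := by
        intro y hy
        have hyS : y ∈ S := Finset.mem_of_mem_erase hy
        refine Finset.mem_erase.2 ⟨fun hfy => ?_, hmem y hyS⟩
        exact (Finset.mem_erase.1 hy).1 (by rw [← hinv y hyS, hfy, hfx])
      have hinvT : ∀ y ∈ S.erase x, f (f y) = y :=
        fun y hy => hinv y (Finset.mem_of_mem_erase hy)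
      have hrec := ih _ hTs hmemT hinvT
      have hx1 : 1 ≤ S.card := Finset.card_pos.2 ⟨x, hx⟩
      have hcard := Finset.card_erase_of_mem hx
      have hfilter : S.filter (fun y => f y = y) =
          insert x ((S.erase x).filter (fun y => f y = y)) := by
        rw [Finset.filter_erase,
          Finset.insert_erase (Finset.mem_filter.2 ⟨hx, hfx⟩ :
            x ∈ S.filter (fun y => f y = y))]
      have hxnot : x ∉ (S.erase x).filter (fun y => f y = y) :=
        fun h => (Finset.mem_erase.1 (Finset.mem_filter.1 h).1).1 rfl
      have hfc := hfilter ▸ Finset.card_insert_of_notMem hxnot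
      omega
    · -- remove the 2-cycle {x, f x}
      have hfxS : f x ∈ S := hmem x hx
      have hfxe : f x ∈ S.erase x := Finset.mem_erase.2 ⟨hfx, hfxS⟩
      have hTs : (S.erase x).erase (f x) ⊂ S :=
        (Finset.erase_ssubset hfxe).trans (Finset.erase_ssubset hx)
      have hmemT : ∀ y ∈ (S.erase x).erase (f x), f y ∈ (S.erase x).erase (f x) := by
        intro y hy
        have h1 : y ≠ f x := (Finset.mem_erase.1 hy).1
        have h2 : y ∈ S.erase x := Finset.mem_of_mem_erase hy
        have h3 : y ≠ x := (Finset.mem_erase.1 h2).1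
        have hyS : y ∈ S := Finset.mem_of_mem_erase h2
        refine Finset.mem_erase.2 ⟨fun hfy => ?_, Finset.mem_erase.2 ⟨fun hfy => ?_, hmem y hyS⟩⟩
        · exact h3 (by rw [← hinv y hyS, hfy, hinv x hx])
        · exact h1 (by rw [← hinv y hyS, hfy])
      have hinvT : ∀ y ∈ (S.erase x).erase (f x), f (f y) = y :=
        fun y hy => hinv y (Finset.mem_of_mem_erase (Finset.mem_of_mem_erase hy))
      have hrec := ih _ hTs hmemT hinvT
      have hx1 : 1 ≤ S.card := Finset.card_pos.2 ⟨x, hx⟩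
      have hx2 : 1 ≤ (S.erase x).card := Finset.card_pos.2 ⟨f x, hfxe⟩
      have hc1 := Finset.card_erase_of_mem hx
      have hc2 := Finset.card_erase_of_mem hfxe
      have hxnot : x ∉ S.filter (fun y => f y = y) :=
        fun h => hfx (Finset.mem_filter.1 h).2
      have hfxnot : f x ∉ (S.filter (fun y => f y = y)).erase x := by
        intro h
        have h2 : f (f x) = f x := (Finset.mem_filter.1 (Finset.mem_of_mem_erase h)).2
        exact hfx (h2.symm.trans (hinv x hx))
      have hfilter : ((S.erase x).erase (f x)).filter (fun y => f y = y) =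
          S.filter (fun y => f y = y) := by
        rw [Finset.filter_erase, Finset.filter_erase,
          Finset.erase_eq_of_notMem hfxnot, Finset.erase_eq_of_notMem hxnot]
      have hfc := congrArg Finset.card hfilter
      omega

-- fixed points of d ↦ n / d on the divisors of n
lemma card_fixed_divisors (n : ℕ) (hn : 1 ≤ n) :
    ((n.divisors).filter (fun d => n / d = d)).card =
      (if Nat.sqrt n * Nat.sqrt n = n then 1 else 0) := by
  by_cases hsq : Nat.sqrt n * Nat.sqrt n = n
  · rw [if_pos hsq]
    have hset : (n.divisors).filter (fun d => n / d = d) = {Nat.sqrt n} := by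
      ext d
      simp only [Finset.mem_filter, Nat.mem_divisors, Finset.mem_singleton]
      constructor
      · rintro ⟨⟨hd, hn0⟩, hdd⟩
        have hddn : d * d = n := by
          conv_rhs => rw [← Nat.div_mul_cancel hd]
          rw [hdd]
        rw [← hddn, Nat.sqrt_eq]
      · rintro rfl
        have hm1 : 1 ≤ Nat.sqrt n := Nat.sqrt_pos.2 (by omega)
        refine ⟨⟨Dvd.intro _ hsq, by omega⟩, ?_⟩
        calc n / Nat.sqrt n = Nat.sqrt n * Nat.sqrt n / Nat.sqrt n := by rw [hsq]
          _ = Nat.sqrt n := Nat.mul_div_cancel_left _ (by omega)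
    rw [hset, Finset.card_singleton]
  · rw [if_neg hsq]
    refine Finset.card_eq_zero.2 (Finset.eq_empty_iff_forall_notMem.2 ?_)
    intro d hd
    obtain ⟨⟨hdvd, hn0⟩, hdd⟩ :=
      (by simpa only [Finset.mem_filter, Nat.mem_divisors] using hd :
        (d ∣ n ∧ n ≠ 0) ∧ n / d = d)
    have hddn : d * d = n := by
      conv_rhs => rw [← Nat.div_mul_cancel hdvd]
      rw [hdd]
    exact hsq (by rw [← hddn, Nat.sqrt_eq])

lemma divisors_card_parity (n : ℕ) (hn : 1 ≤ n) :
    n.divisors.card % 2 = (if Nat.sqrt n * Nat.sqrt n = n then 1 else 0) := by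
  have hmem : ∀ d ∈ n.divisors, n / d ∈ n.divisors := by
    intro d hd
    obtain ⟨hdvd, hn0⟩ := Nat.mem_divisors.1 hd
    exact Nat.mem_divisors.2 ⟨Nat.div_dvd_of_dvd hdvd, hn0⟩
  have hinv : ∀ d ∈ n.divisors, n / (n / d) = d := by
    intro d hd
    obtain ⟨hdvd, hn0⟩ := Nat.mem_divisors.1 hd
    exact Nat.div_div_self hdvd hn0
  rw [card_parity_involution (fun d => n / d) n.divisors hmem hinv,
    card_fixed_divisors n hn]
  split_ifs <;> rfl

-- countP over List.range vs a filtered Finset.range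
lemma countP_range_eq_card_filter (p : ℕ → Prop) [DecidablePred p] :
    ∀ n : ℕ, (List.range n).countP (fun k => decide (p k)) =
      ((Finset.range n).filter p).card := by
  intro n
  induction n with
  | zero => simp
  | succ n ih =>
      rw [List.range_succ, Finset.range_add_one, List.countP_append,
        Finset.filter_insert]
      by_cases h : p n <;>
        simp [h, ih, Finset.card_insert_of_notMem, Finset.notMem_range_self]

lemma divisors_card_eq (n : ℕ) (hn : 1 ≤ n) :
    n.divisors.card = ((Finset.range n).filter (fun k => (k + 1) ∣ n)).card := by
  refine Finset.card_nbij' (fun d => d - 1) (fun k => k + 1) ?_ ?_ ?_ ?_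
  · intro d hd
    obtain ⟨hdvd, hn0⟩ := Nat.mem_divisors.1 hd
    have h1 : 1 ≤ d := Nat.pos_of_dvd_of_pos hdvd (by omega)
    have h2 : d ≤ n := Nat.le_of_dvd (by omega) hdvd
    simp only [Finset.coe_filter, Set.mem_setOf_eq, Finset.mem_range]
    exact ⟨by omega, by rwa [Nat.sub_add_cancel h1]⟩
  · intro k hk
    simp only [Finset.coe_filter, Set.mem_setOf_eq, Finset.mem_range] at hk
    exact Nat.mem_divisors.2 ⟨hk.2, by omega⟩
  · intro d hd
    obtain ⟨hdvd, hn0⟩ := Nat.mem_divisors.1 hd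
    have h1 : 1 ≤ d := Nat.pos_of_dvd_of_pos hdvd (by omega)
    simp only [Set.mem_setOf_eq]
    omega
  · intro k _
    simp

lemma countP_divisors (i : Int) (h : 1 ≤ i) :
    (PySem.List.pyRange 1 (i + 1) 1).countP (fun j => i % j == 0) =
      (i.toNat).divisors.card := by
  rw [divisors_card_eq i.toNat (by omega), PySem.List.pyRange_one, List.countP_map]
  rw [← countP_range_eq_card_filter (fun k => (k + 1) ∣ i.toNat)]
  have harg : (i + 1 - 1).toNat = i.toNat := by omega
  rw [harg]
  apply List.countP_congr
  intro k _
  have hcast : (1 + (k : Int)) = ((k + 1 : ℕ) : Int) := by push_cast; ring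
  have hiv : i = ((i.toNat : ℕ) : Int) := by omega
  have hiff : i % (1 + (k : Int)) = 0 ↔ (k + 1) ∣ i.toNat := by
    constructor
    · intro hmod
      have hd := Int.dvd_of_emod_eq_zero hmod
      rw [hcast, hiv] at hd
      exact_mod_cast hd
    · intro hd
      apply Int.emod_eq_zero_of_dvd
      rw [hcast, hiv]
      exact_mod_cast hd
  simp only [Function.comp_apply, beq_iff_eq, decide_eq_true_eq]
  exact hiff

-- the integer-sqrt telescoping step
lemma sqrt_step (n : ℕ) (hn : 1 ≤ n) :
    Nat.sqrt n = Nat.sqrt (n - 1) + (if Nat.sqrt n * Nat.sqrt n = n then 1 else 0) := by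
  have h1 : Nat.sqrt n * Nat.sqrt n ≤ n := Nat.sqrt_le n
  have h2 : n < (Nat.sqrt n + 1) * (Nat.sqrt n + 1) := Nat.lt_succ_sqrt n
  by_cases hsq : Nat.sqrt n * Nat.sqrt n = n
  · rw [if_pos hsq]
    have hm1 : 1 ≤ Nat.sqrt n := Nat.sqrt_pos.2 (by omega)
    obtain ⟨t, ht⟩ : ∃ t, Nat.sqrt n = t + 1 := ⟨Nat.sqrt n - 1, by omega⟩
    have hexp : t * t + 2 * t + 1 = n := by rw [← hsq, ht]; ring
    have hle : t ≤ Nat.sqrt (n - 1) := Nat.le_sqrt.2 (by omega)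
    have hlt : Nat.sqrt (n - 1) < t + 1 := by
      rw [← ht]
      exact Nat.sqrt_lt.2 (by omega)
    omega
  · rw [if_neg hsq]
    have hle : Nat.sqrt n ≤ Nat.sqrt (n - 1) := Nat.le_sqrt.2 (by omega)
    have hge : Nat.sqrt (n - 1) ≤ Nat.sqrt n := Nat.sqrt_le_sqrt (by omega)
    omega

lemma pvP_nonpos (i : Int) (h : i ≤ 0) : pvP i = false := by
  unfold pvP
  rw [PySem.List.pyRange_one_eq_nil (by omega)]
  simp

lemma pvP_pos (i : Int) (h : 1 ≤ i) :
    (if pvP i then (1 : Int) else 0) =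
      (Nat.sqrt i.toNat : Int) - (Nat.sqrt (i.toNat - 1) : Int) := by
  have hpv : pvP i = (((i.toNat.divisors.card : Int)) % 2 != 0) := by
    unfold pvP
    have h5 : (PySem.List.pyRange 1 (i + 1) 1).foldl
        (fun divCount j => if i % j == 0 then divCount + 1 else divCount) 0 =
        ((i.toNat.divisors.card : Int)) := by
      rw [foldl_count_inner i (PySem.List.pyRange 1 (i + 1) 1) 0, zero_add,
        countP_divisors i h]
    exact congrArg (fun t : Int => (t % 2 != 0)) h5
  have hn : 1 ≤ i.toNat := by omega
  have hp := divisors_card_parity i.toNat hn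
  have hs := sqrt_step i.toNat hn
  by_cases hsq : Nat.sqrt i.toNat * Nat.sqrt i.toNat = i.toNat
  · rw [if_pos hsq] at hp hs
    have hb : pvP i = true := by
      rw [hpv]
      simp only [bne_iff_ne, ne_eq]
      omega
    rw [hb, if_pos rfl]
    omega
  · rw [if_neg hsq] at hp hs
    have hb : pvP i = false := by
      rw [hpv]
      simp only [bne_eq_false_iff_eq]
      omega
    rw [hb]
    simp only [Bool.false_eq_true, if_false]
    omega

-- A's count, as a function of the upper bound
lemma countP_base (a b : Int) (h : b < max a 1) :
    ((PySem.List.pyRange a (b + 1) 1).countP pvP : Int) = 0 := by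
  by_cases h2 : b < a
  · rw [PySem.List.pyRange_one_eq_nil (by omega)]
    simp
  · have hz : ∀ x ∈ PySem.List.pyRange a (b + 1) 1, ¬ (pvP x = true) := by
      intro x hx
      have hm := PySem.List.mem_pyRange_one.1 hx
      rw [pvP_nonpos x (by omega)]
      simp
    rw [List.countP_eq_zero.2 hz]
    rfl

lemma countP_step (a b : Int) (h : max a 1 ≤ b) :
    ((PySem.List.pyRange a (b + 1) 1).countP pvP : Int) =
      ((PySem.List.pyRange a b 1).countP pvP : Int) + (if pvP b then 1 else 0) := by
  rw [PySem.List.pyRange_one_succ_right (by omega : a ≤ b), List.countP_append]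
  by_cases hb : pvP b = true <;> simp [hb]

lemma main_telescope (a : Int) :
    ∀ k : ℕ,
      ((PySem.List.pyRange a (max a 1 - 1 + (k : Int) + 1) 1).countP pvP : Int) =
        (Nat.sqrt ((max a 1 - 1 + (k : Int)).toNat) : Int) -
          (Nat.sqrt ((max a 1 - 1).toNat) : Int) := by
  intro k
  induction k with
  | zero =>
      simp only [Nat.cast_zero, add_zero, sub_self]
      exact countP_base a (max a 1 - 1) (by omega)
  | succ k ih =>
      have hb : max a 1 ≤ max a 1 - 1 + ((k : Int) + 1) := by omega
      have hstep := countP_step a (max a 1 - 1 + ((k : Int) + 1)) hb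
      have harr : max a 1 - 1 + ((k : Int) + 1) - 1 = max a 1 - 1 + (k : Int) := by ring
      have hpos : (1 : Int) ≤ max a 1 - 1 + ((k : Int) + 1) := by omega
      have hone := pvP_pos (max a 1 - 1 + ((k : Int) + 1)) hpos
      have hnat : (max a 1 - 1 + (k : Int)).toNat =
          (max a 1 - 1 + ((k : Int) + 1)).toNat - 1 := by omega
      push_cast
      calc ((PySem.List.pyRange a (max a 1 - 1 + ((k : Int) + 1) + 1) 1).countP pvP : Int)
          = ((PySem.List.pyRange a (max a 1 - 1 + (k : Int) + 1) 1).countP pvP : Int)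
            + (if pvP (max a 1 - 1 + ((k : Int) + 1)) then 1 else 0) := by
            rw [hstep]; ring_nf
        _ = (Nat.sqrt ((max a 1 - 1 + (k : Int)).toNat) : Int)
            - (Nat.sqrt ((max a 1 - 1).toNat) : Int)
            + ((Nat.sqrt ((max a 1 - 1 + ((k : Int) + 1)).toNat) : Int)
              - (Nat.sqrt ((max a 1 - 1 + ((k : Int) + 1)).toNat - 1) : Int)) := by
            rw [ih, hone]
        _ = (Nat.sqrt ((max a 1 - 1 + ((k : Int) + 1)).toNat) : Int)
            - (Nat.sqrt ((max a 1 - 1).toNat) : Int) := by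
            rw [hnat]
            ring

-- ===== VERDICT (by name: the statement is the Claim_ definition above) =====
theorem OddDivCount_spec : Claim_equal_OddDivCount := by
  intro a b _
  unfold Spec_OddDivCount OddDivCount_alt
  rw [A_eq_countP]
  by_cases hb : b < max a 1
  · rw [if_pos hb]
    exact countP_base a b hb
  · rw [if_neg hb]
    have hk : b = max a 1 - 1 + ((b - (max a 1 - 1)).toNat : Int) := by omega
    have h := main_telescope a ((b - (max a 1 - 1)).toNat)
    rw [← hk] at h
    exact h
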